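-- pv_equiv track=rewrite | github.com/kar911/python_work | useModule.py | oto2
-- ===== SOURCE A (Python) =====
-- def oto2(n):
--     s=0
--     i=0
--     while n>0:
--        p=n%10
--        if p == 0:
--            p=2
--            s=s+(p*pow(10,i))
--        else:
--            s=s+(p*pow(10,i))
--        n=n//10
--        i = i + 1
--     return s
-- ===== SOURCE B (Python) =====
-- def oto2(n):
--     if n <= 0:
--         return 0
--     d = n % 10
--     return (2 if d == 0 else d) + 10 * oto2(n // 10)
-- ===== Notes on version B (the rewrite author's own statement) =====
-- stated objective: simpler
-- what changed: Replaces A's iterative loop with accumulator s and positional pow(10,i) reconstruction by a direct structural recursion on the digits that needs no accumulator, no position counter and no pow.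
import Mathlib
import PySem

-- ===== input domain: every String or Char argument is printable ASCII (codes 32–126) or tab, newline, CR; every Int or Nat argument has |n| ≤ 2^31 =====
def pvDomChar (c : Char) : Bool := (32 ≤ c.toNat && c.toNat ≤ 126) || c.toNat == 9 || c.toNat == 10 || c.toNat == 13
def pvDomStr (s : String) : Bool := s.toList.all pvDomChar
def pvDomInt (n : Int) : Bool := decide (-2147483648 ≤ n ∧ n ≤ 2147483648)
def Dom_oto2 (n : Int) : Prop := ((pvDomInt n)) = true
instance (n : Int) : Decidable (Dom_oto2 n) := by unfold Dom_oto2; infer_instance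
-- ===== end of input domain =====

-- B replaces A's accumulator/pow(10,i) loop by a direct digit recursion (simpler; same return values).
-- ===== PORT A =====
-- while n>0: p=n%10; if p==0: p=2; s=s+p*10^i; n=n//10; i=i+1  — loop state (n, s, i)
def oto2Go (n s : Int) (i : Nat) : Int :=
  if h : n > 0 then
    let p := PySem.Int.mod n 10
    let p := if p = 0 then (2 : Int) else p
    oto2Go (PySem.Int.floordiv n 10) (s + p * (10 : Int) ^ i) (i + 1)
  else s
termination_by n.toNat
decreasing_by
  rw [PySem.Int.floordiv_eq_ediv_of_pos (by omega)]
  omega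

def oto2 (n : Int) : Int := oto2Go n 0 0

-- ===== PORT B =====
def oto2_alt (n : Int) : Int :=
  if h : n ≤ 0 then 0
  else
    let d := PySem.Int.mod n 10
    (if d = 0 then (2 : Int) else d) + 10 * oto2_alt (PySem.Int.floordiv n 10)
termination_by n.toNat
decreasing_by
  rw [PySem.Int.floordiv_eq_ediv_of_pos (by omega)]
  omega

-- ===== PRECONDITION & SPEC =====
def Spec_oto2 (n : Int) (out : Int) : Prop := out = oto2_alt n
instance (n : Int) (out : Int) : Decidable (Spec_oto2 n out) := by unfold Spec_oto2; infer_instance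

-- ===== CLAIM (what is proved, stated in full; the proofs are below) =====
def Claim_equal_oto2 : Prop := ∀ (n : Int), Dom_oto2 n → Spec_oto2 n (oto2 n)

-- ===== LEMMAS AND PROOFS =====

-- The loop of A, started at accumulator s and position i, returns s plus 10^i times B's value.
theorem oto2Go_eq_aux (m : Nat) : ∀ (n : Int), n.toNat ≤ m → ∀ (s : Int) (i : Nat),
    oto2Go n s i = s + (10 : Int) ^ i * oto2_alt n := by
  induction m with
  | zero =>
    intro n hn s i
    have hle : n ≤ 0 := by omega
    rw [oto2Go, oto2_alt]
    simp only [dif_neg (by omega : ¬ n > 0), dif_pos hle]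
    ring
  | succ m ih =>
    intro n hn s i
    rw [oto2Go, oto2_alt]
    by_cases h : n > 0
    · have hdiv : PySem.Int.floordiv n 10 < n := by
        rw [PySem.Int.floordiv_eq_ediv_of_pos (by omega)]; omega
      simp only [dif_pos h, dif_neg (by omega : ¬ n ≤ 0)]
      rw [ih (PySem.Int.floordiv n 10) (by omega)]
      ring
    · simp only [dif_neg h, dif_pos (by omega : n ≤ 0)]
      ring

theorem oto2Go_eq (n s : Int) (i : Nat) :
    oto2Go n s i = s + (10 : Int) ^ i * oto2_alt n :=
  oto2Go_eq_aux n.toNat n le_rfl s i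

-- ===== VERDICT (by name: the statement is the Claim_ definition above) =====
theorem oto2_spec : Claim_equal_oto2 := by
  intro n _
  unfold Spec_oto2 oto2
  rw [oto2Go_eq]
  ring
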